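-- pv_equiv track=rewrite | github.com/soramametaro/project1 | project1_3.py | words2vec
-- ===== SOURCE A (Python) =====
-- def words2vec(words, frequent_words):
--     counter = {}
--     for fw in frequent_words:
--         counter[fw] = 0
--     for w in words:
--         if w in counter:
--             counter[w] += 1
--     vec = []
--     for i in range(len(frequent_words)):
--         vec.append(counter[frequent_words[i]])
--     return vec
-- ===== SOURCE B (Python) =====
-- def words2vec(words, frequent_words):
--     # Fold over words, elementwise-adding each word's one-hot indicator vector
--     # (aligned with frequent_words) into the answer vector; no counter dict,
--     # no read-back pass.
--     vec = [0] * len(frequent_words)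
--     for w in words:
--         vec = [c + (fw == w) for fw, c in zip(frequent_words, vec)]
--     return vec
-- ===== Notes on version B (the rewrite author's own statement) =====
-- stated objective: alternative
-- what changed: Drops the counter dict and the index read-back loop entirely: B folds over words, elementwise-summing one-hot indicator vectors (aligned with frequent_words) directly into the output vector.
import Mathlib
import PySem

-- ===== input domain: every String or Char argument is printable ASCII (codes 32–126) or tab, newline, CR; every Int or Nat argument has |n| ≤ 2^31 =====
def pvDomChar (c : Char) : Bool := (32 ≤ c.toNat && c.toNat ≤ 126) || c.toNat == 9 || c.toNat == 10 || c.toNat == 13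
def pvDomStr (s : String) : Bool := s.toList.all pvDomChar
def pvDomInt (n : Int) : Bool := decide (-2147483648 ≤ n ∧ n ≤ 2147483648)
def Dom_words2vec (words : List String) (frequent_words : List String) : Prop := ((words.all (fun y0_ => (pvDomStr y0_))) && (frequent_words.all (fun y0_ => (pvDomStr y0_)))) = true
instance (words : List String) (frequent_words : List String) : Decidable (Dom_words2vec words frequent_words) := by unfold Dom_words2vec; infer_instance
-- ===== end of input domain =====

-- B drops A's counter dict and read-back loop: it folds over words, elementwise-summing
-- one-hot indicator vectors aligned with frequent_words into the output vector; equal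
-- return value on all inputs, no speed claim.

-- ===== PORT A =====
-- counter = {}; for fw in frequent_words: counter[fw] = 0
-- for w in words: if w in counter: counter[w] += 1
-- vec = []; for i in range(len(frequent_words)): vec.append(counter[frequent_words[i]])
-- (frequent_words[i] is in range for every i of the loop, and counter[frequent_words[i]]
--  can never raise KeyError since every fw was inserted; pyGetD/getD are exact here.)
def w2vInit (frequent_words : List String) : PySem.Dict String Int :=
  frequent_words.foldl (fun d fw => d.insert fw 0) PySem.Dict.empty
def w2vCount (words : List String) (frequent_words : List String) : PySem.Dict String Int :=
  words.foldl (fun d w => if d.contains w then d.modify w 0 (· + 1) else d) (w2vInit frequent_words)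
def words2vec (words : List String) (frequent_words : List String) : List Int :=
  (PySem.List.pyRange 0 (PySem.List.len frequent_words) 1).foldl
    (fun vec i => vec ++ [(w2vCount words frequent_words).getD (PySem.List.pyGetD frequent_words i "") 0]) []

-- ===== PORT B =====
-- vec = [0] * len(frequent_words)
-- for w in words: vec = [c + (fw == w) for fw, c in zip(frequent_words, vec)]
-- return vec        (True/False added to an int is 1/0)
def words2vec_alt (words : List String) (frequent_words : List String) : List Int :=
  words.foldl
    (fun vec w => (frequent_words.zip vec).map (fun p => p.2 + (if p.1 = w then 1 else 0)))
    (List.replicate frequent_words.length 0)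

-- ===== PRECONDITION & SPEC =====
def Spec_words2vec (words : List String) (frequent_words : List String) (out : List Int) : Prop := out = words2vec_alt words frequent_words
instance (words : List String) (frequent_words : List String) (out : List Int) : Decidable (Spec_words2vec words frequent_words out) := by unfold Spec_words2vec; infer_instance

-- ===== CLAIM (what is proved, stated in full; the proofs are below) =====
def Claim_equal_words2vec : Prop := ∀ (words : List String) (frequent_words : List String), Dom_words2vec words frequent_words → Spec_words2vec words frequent_words (words2vec words frequent_words)

-- ===== LEMMAS AND PROOFS =====

-- A side: the zero-initialising loop: every key looked up with default 0 yields 0 when the start does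
theorem init_getD (fws : List String) (d : PySem.Dict String Int)
    (h : ∀ k, d.getD k 0 = 0) (fw : String) :
    (fws.foldl (fun d fw => d.insert fw 0) d).getD fw 0 = 0 := by
  induction fws generalizing d with
  | nil => exact h fw
  | cons x xs ih =>
      simp only [List.foldl_cons]
      exact ih _ (fun k => by rw [PySem.Dict.getD_insert]; split <;> simp [h])

-- A side: the zero-initialising loop contains exactly the inserted keys plus the old ones
theorem contains_foldl_insert (fws : List String) (d : PySem.Dict String Int) (fw : String) :
    (fws.foldl (fun d fw => d.insert fw (0 : Int)) d).contains fw
      = (decide (fw ∈ fws) || d.contains fw) := by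
  induction fws generalizing d with
  | nil => simp
  | cons x xs ih =>
      simp only [List.foldl_cons, ih, PySem.Dict.contains_insert]
      by_cases hfx : fw = x <;> by_cases hxs : fw ∈ xs <;> simp [hfx, hxs]

-- A side: the counting loop: for a key the dict contains, getD accumulates exactly the count
theorem count_getD (ws : List String) (d : PySem.Dict String Int) (fw : String)
    (h : d.contains fw = true) :
    (ws.foldl (fun d w => if d.contains w then d.modify w 0 (· + 1) else d) d).getD fw 0
      = d.getD fw 0 + (List.count fw ws : Int) := by
  induction ws generalizing d with
  | nil => simp
  | cons w ws ih =>
      simp only [List.foldl_cons]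
      by_cases hc : d.contains w = true
      · rw [if_pos hc]
        have hcont : (d.modify w 0 (· + 1)).contains fw = true := by
          simp [PySem.Dict.contains_modify, h]
        rw [ih _ hcont, PySem.Dict.getD_modify]
        by_cases hfw : fw = w
        · subst hfw; simp; ring
        · simp [hfw, Ne.symm hfw]
      · rw [if_neg hc]
        have hfw : fw ≠ w := fun he => hc (he ▸ h)
        rw [ih _ h]
        simp [Ne.symm hfw]

-- A's result is the per-frequent-word count vector
theorem wordsA_eq_map (words fws : List String) :
    words2vec words fws = fws.map (fun fw => (List.count fw words : Int)) := by
  unfold words2vec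
  rw [PySem.List.foldl_pyRange_zero_pyGetD fws ""
    (fun vec fw => vec ++ [(w2vCount words fws).getD fw 0]) [],
    PySem.List.foldl_append_singleton_eq_map]
  simp only [List.nil_append]
  refine List.map_congr_left (fun fw hmem => ?_)
  unfold w2vCount w2vInit
  rw [count_getD _ _ _ (by rw [contains_foldl_insert]; simp [hmem]),
    init_getD fws _ (fun k => by simp)]
  simp

-- B side: one fold step over a vector of the shape fws.map f keeps that shape
theorem B_step (fws : List String) (f : String → Int) (w : String) :
    (fws.zip (fws.map f)).map (fun p => p.2 + (if p.1 = w then 1 else 0))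
      = fws.map (fun fw => f fw + (if fw = w then 1 else 0)) := by
  induction fws with
  | nil => rfl
  | cons x xs ih => simp [ih]

-- B side: the fold's invariant — the vector stays fws.map of a running per-word count
theorem B_inv (ws fws : List String) (f : String → Int) :
    ws.foldl
      (fun vec w => (fws.zip vec).map (fun p => p.2 + (if p.1 = w then 1 else 0)))
      (fws.map f)
      = fws.map (fun fw => f fw + (List.count fw ws : Int)) := by
  induction ws generalizing f with
  | nil => simp
  | cons w ws ih =>
      simp only [List.foldl_cons, B_step, ih]
      refine List.map_congr_left (fun fw _ => ?_)
      rw [List.count_cons]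
      by_cases hfw : fw = w
      · subst hfw; simp; ring
      · simp [hfw, Ne.symm hfw]

-- B's result is the per-frequent-word count vector too
theorem wordsB_eq_map (words fws : List String) :
    words2vec_alt words fws = fws.map (fun fw => (List.count fw words : Int)) := by
  unfold words2vec_alt
  rw [show List.replicate fws.length (0 : Int) = fws.map (fun _ => 0) by
        simp [List.map_const'],
      B_inv]
  simp

-- ===== VERDICT (by name: the statement is the Claim_ definition above) =====
theorem words2vec_spec : Claim_equal_words2vec := by
  intro words fws _
  show words2vec words fws = words2vec_alt words fws
  rw [wordsA_eq_map, wordsB_eq_map]
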